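-- pv_equiv track=rewrite | github.com/TgCatUB/catuserbot | haruka/modules/helper_funcs/telethon/string_handler.py | escape_invalid_curly_brackets
-- ===== SOURCE A (Python) =====
-- def escape_invalid_curly_brackets(text, valids) -> str:
--     new_text = ""
--     idx = 0
--     while idx < len(text):
--         if text[idx] == "{":
--             if idx + 1 < len(text) and text[idx + 1] == "{":
--                 idx += 2
--                 new_text += "{{{{"
--                 continue
--             else:
--                 success = False
--                 for v in valids:
--                     if text[idx:].startswith('{' + v + '}'):
--                         success = True
--                         break
--                 if success:
--                     new_text += text[idx:idx + len(v) + 2]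
--                     idx += len(v) + 2
--                     continue
--                 else:
--                     new_text += "{{"
--
--         elif text[idx] == "}":
--             if idx + 1 < len(text) and text[idx + 1] == "}":
--                 idx += 2
--                 new_text += "}}}}"
--                 continue
--             else:
--                 new_text += "}}"
--
--         else:
--             new_text += text[idx]
--         idx += 1
--
--     return new_text
-- ===== SOURCE B (Python) =====
-- import re
--
--
-- def escape_invalid_curly_brackets(text, valids) -> str:
--     # One regex pass: try '{{' first, then each valid placeholder in order,
--     # then '}}', then lone '{' and lone '}'.
--     pattern = re.compile(
--         "|".join(
--             [r"\{\{"]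
--             + [r"\{" + re.escape(v) + r"\}" for v in valids]
--             + [r"\}\}", r"\{", r"\}"]
--         )
--     )
--
--     def repl(m):
--         t = m.group(0)
--         if t == "{{":
--             return "{{{{"
--         if t == "}}":
--             return "}}}}"
--         if t == "{":
--             return "{{"
--         if t == "}":
--             return "}}"
--         return t  # a recognized placeholder stays as is
--
--     return pattern.sub(repl, text)
-- ===== Notes on version B (the rewrite author's own statement) =====
-- stated objective: idiomatic
-- what changed: Replaced the manual index loop with branchy appends by a single re.sub over an alternation pattern ('{{' | each '{valid}' | '}}' | '{' | '}') with a replacement callback.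
import Mathlib
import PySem

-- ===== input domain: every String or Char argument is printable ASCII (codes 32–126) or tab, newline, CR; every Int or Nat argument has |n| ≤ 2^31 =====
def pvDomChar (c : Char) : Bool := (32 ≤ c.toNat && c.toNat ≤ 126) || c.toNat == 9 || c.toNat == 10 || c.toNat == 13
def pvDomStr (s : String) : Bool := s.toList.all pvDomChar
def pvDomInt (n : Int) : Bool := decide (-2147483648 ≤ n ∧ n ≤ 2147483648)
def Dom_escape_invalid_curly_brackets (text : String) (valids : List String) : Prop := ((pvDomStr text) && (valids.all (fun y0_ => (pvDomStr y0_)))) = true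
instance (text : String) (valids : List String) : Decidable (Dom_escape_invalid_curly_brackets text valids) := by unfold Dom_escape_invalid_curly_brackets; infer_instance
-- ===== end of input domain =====

-- B replaces A's manual index loop by one substitution pass that, at each position,
-- tries an ordered table of literal alternatives ('{{', each '{valid}', '}}', '{', '}')
-- — the re.sub alternation ported by hand (exact for these literal alternatives).

-- ===== PORT A =====
-- A's while loop over idx, transliterated as recursion on the remaining suffix `cs`
-- (text[idx:]) with the accumulator `acc` (new_text); the inner for-loop with
-- success/break is `List.find?` (first matching valid). Strings are List Char.
def pvA_loop (vs : List (List Char)) (cs : List Char) (acc : List Char) : List Char :=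
  match cs with
  | [] => acc
  | c :: rest =>
    if c = '{' then
      if rest.head? = some '{' then
        pvA_loop vs (rest.drop 1) (acc ++ "{{{{".toList)
      else
        match vs.find? (fun v => ('{' :: v ++ ['}']).isPrefixOf (c :: rest)) with
        | some v => pvA_loop vs ((c :: rest).drop (v.length + 2)) (acc ++ (c :: rest).take (v.length + 2))
        | none => pvA_loop vs rest (acc ++ "{{".toList)
    else if c = '}' then
      if rest.head? = some '}' then
        pvA_loop vs (rest.drop 1) (acc ++ "}}}}".toList)
      else
        pvA_loop vs rest (acc ++ "}}".toList)
    else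
      pvA_loop vs rest (acc ++ [c])
termination_by cs.length
decreasing_by all_goals simp [List.length_drop]

def escape_invalid_curly_brackets (text : String) (valids : List String) : String :=
  String.ofList (pvA_loop (valids.map String.toList) text.toList [])

-- ===== PORT B =====
-- the ordered alternation table: pattern ↦ replacement (callback already applied)
def pvB_patterns (vs : List (List Char)) : List (List Char × List Char) :=
  (['{', '{'], "{{{{".toList) ::
    (vs.map (fun v => ('{' :: v ++ ['}'], '{' :: v ++ ['}']))) ++
      [(['}', '}'], "}}}}".toList), (['{'], "{{".toList), (['}'], "}}".toList)]

theorem pvB_patterns_ne_nil (vs : List (List Char)) (p : List Char × List Char)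
    (hp : p ∈ pvB_patterns vs) : p.1 ≠ [] := by
  simp [pvB_patterns] at hp
  rcases hp with h | ⟨v, _, h⟩ | h | h | h <;> subst h <;> simp

-- re.sub: at each position take the first alternative that matches, emit its
-- replacement and skip it; otherwise copy the character. Exact for this pattern
-- (literal, nonempty alternatives).
def pvB_loop (vs : List (List Char)) (cs : List Char) : List Char :=
  match cs with
  | [] => []
  | c :: rest =>
    match h : (pvB_patterns vs).find? (fun p => p.1.isPrefixOf (c :: rest)) with
    | some p => p.2 ++ pvB_loop vs ((c :: rest).drop p.1.length)
    | none => c :: pvB_loop vs rest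
termination_by cs.length
decreasing_by
  · have hmem := List.mem_of_find?_eq_some h
    have := pvB_patterns_ne_nil vs p hmem
    have : 0 < p.1.length := List.length_pos_iff.mpr this
    simp [List.length_drop]; omega
  · simp

def escape_invalid_curly_brackets_alt (text : String) (valids : List String) : String :=
  String.ofList (pvB_loop (valids.map String.toList) text.toList)

-- ===== PRECONDITION & SPEC =====
def Spec_escape_invalid_curly_brackets (text : String) (valids : List String) (out : String) : Prop := out = escape_invalid_curly_brackets_alt text valids
instance (text : String) (valids : List String) (out : String) : Decidable (Spec_escape_invalid_curly_brackets text valids out) := by unfold Spec_escape_invalid_curly_brackets; infer_instance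

-- ===== CLAIM (what is proved, stated in full; the proofs are below) =====
def Claim_equal_escape_invalid_curly_brackets : Prop := ∀ (text : String) (valids : List String), Dom_escape_invalid_curly_brackets text valids → Spec_escape_invalid_curly_brackets text valids (escape_invalid_curly_brackets text valids)

-- ===== LEMMAS AND PROOFS =====

-- every alternative of the alternation begins with a brace
theorem pv_patterns_head (vs : List (List Char)) (p : List Char × List Char)
    (hp : p ∈ pvB_patterns vs) : p.1.head? = some '{' ∨ p.1.head? = some '}' := by
  simp only [pvB_patterns, List.mem_cons, List.mem_append, List.mem_map,
    List.not_mem_nil, or_false] at hp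
  rcases hp with (h | ⟨v, _, h⟩) | h | h | h
  · subst h; simp
  · rw [← h]; simp
  all_goals subst h; simp

-- the alternation finds nothing at a non-brace character
theorem pv_find_other (vs : List (List Char)) (c : Char) (rest : List Char)
    (h1 : c ≠ '{') (h2 : c ≠ '}') :
    (pvB_patterns vs).find? (fun p => p.1.isPrefixOf (c :: rest)) = none := by
  rw [List.find?_eq_none]
  intro p hp
  simp only [Bool.not_eq_true]
  cases hq : p.1 with
  | nil => exact absurd hq (pvB_patterns_ne_nil vs p hp)
  | cons q qs =>
    have hh := pv_patterns_head vs p hp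
    rw [hq] at hh
    simp only [List.head?_cons, Option.some.injEq] at hh
    simp only [List.isPrefixOf, Bool.and_eq_false_iff, beq_eq_false_iff_ne, ne_eq]
    rcases hh with rfl | rfl
    · exact Or.inl fun h => h1 h.symm
    · exact Or.inl fun h => h2 h.symm

theorem pv_take_prefix (p cs : List Char) (h : p.isPrefixOf cs = true) :
    cs.take p.length = p := by
  exact (List.prefix_iff_eq_take.mp (List.isPrefixOf_iff_prefix.mp h)).symm

theorem pv_find_false {α : Type} (l : List α) : l.find? (fun _ => false) = none :=
  List.find?_eq_none.mpr (by intro x _; simp)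

theorem pvB_loop_step_some (vs : List (List Char)) (c : Char) (rest : List Char)
    (p : List Char × List Char)
    (hfind : (pvB_patterns vs).find? (fun q => q.1.isPrefixOf (c :: rest)) = some p) :
    pvB_loop vs (c :: rest) = p.2 ++ pvB_loop vs (List.drop p.1.length (c :: rest)) := by
  rw [pvB_loop]
  split
  · next q hq =>
    rw [hfind] at hq
    simp only [Option.some.injEq] at hq
    subst hq
    rfl
  · next hq => rw [hfind] at hq; simp at hq

theorem pvB_loop_step_none (vs : List (List Char)) (c : Char) (rest : List Char)
    (hfind : (pvB_patterns vs).find? (fun q => q.1.isPrefixOf (c :: rest)) = none) :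
    pvB_loop vs (c :: rest) = c :: pvB_loop vs rest := by
  rw [pvB_loop]
  split
  · next q hq => rw [hfind] at hq; simp at hq
  · next hq => rfl

theorem pv_main_n (vs : List (List Char)) :
    ∀ (n : Nat) (cs : List Char), cs.length ≤ n → ∀ acc : List Char,
      pvA_loop vs cs acc = acc ++ pvB_loop vs cs := by
  intro n
  induction n with
  | zero =>
    intro cs h acc
    have hnil : cs = [] := by
      cases cs with
      | nil => rfl
      | cons c r => simp at h
    subst hnil
    simp [pvA_loop, pvB_loop]
  | succ n ih =>
    intro cs hlen acc
    match cs with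
    | [] => simp [pvA_loop, pvB_loop]
    | c :: rest =>
      have hrest : rest.length ≤ n := by simp at hlen; omega
      by_cases hc : c = '{'
      · subst hc
        by_cases hh : rest.head? = some '{'
        · -- '{{' : both consume two characters
          obtain ⟨rest2, rfl⟩ : ∃ r2, rest = '{' :: r2 := by
            cases rest with
            | nil => simp at hh
            | cons d r2 =>
              simp only [List.head?_cons, Option.some.injEq] at hh
              exact ⟨r2, by rw [hh]⟩
          have h2 : rest2.length ≤ n := by simp at hrest; omega
          have hfind : (pvB_patterns vs).find?
              (fun p => p.1.isPrefixOf ('{' :: '{' :: rest2)) =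
              some (['{', '{'], "{{{{".toList) := by
            simp [pvB_patterns, List.isPrefixOf]
          rw [pvA_loop, pvB_loop_step_some vs _ _ _ hfind]
          simp only [List.head?_cons, reduceIte]
          simp [ih rest2 h2]
        · -- lone '{' : try the valid placeholders, else escape to '{{'
          have h1' : (['{'].isPrefixOf rest) = false := by
            cases rest with
            | nil => rfl
            | cons d r2 =>
              simp only [List.head?_cons, Option.some.injEq] at hh
              simp [List.isPrefixOf]
              exact fun h => hh h.symm
          have hpredeq : (fun v => ('{' :: v ++ ['}']).isPrefixOf ('{' :: rest)) =
              (fun x : List Char => (x ++ ['}']).isPrefixOf rest) := by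
            funext v
            simp [List.isPrefixOf]
          cases hv : vs.find? (fun x : List Char => (x ++ ['}']).isPrefixOf rest) with
          | some v =>
            have hpre : ('{' :: v ++ ['}']).isPrefixOf ('{' :: rest) = true := by
              have := List.find?_some hv
              simp only [List.isPrefixOf, List.cons_append]
              simpa using this
            have hfind : (pvB_patterns vs).find?
                (fun p => p.1.isPrefixOf ('{' :: rest)) =
                some ('{' :: v ++ ['}'], '{' :: v ++ ['}']) := by
              simp [pvB_patterns, List.find?_append, List.find?_map, Function.comp_def,
                List.isPrefixOf, h1', hv]
            have htake := pv_take_prefix _ _ hpre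
            have hlen2 : ('{' :: v ++ ['}']).length = v.length + 2 := by simp
            rw [hlen2] at htake
            have hdrop : (List.drop (v.length + 2) ('{' :: rest)).length ≤ n := by
              simp only [List.length_drop, List.length_cons]
              omega
            rw [pvA_loop, pvB_loop_step_some vs _ _ _ hfind]
            simp only [if_neg hh, reduceIte, hpredeq, hv]
            rw [ih _ hdrop, htake]
            have he : ('{' :: v ++ ['}']).length = v.length + 2 := by simp
            rw [he]
            simp [List.append_assoc]
          | none =>
            have hfind : (pvB_patterns vs).find?
                (fun p => p.1.isPrefixOf ('{' :: rest)) =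
                some (['{'], "{{".toList) := by
              simp [pvB_patterns, List.find?_append, List.find?_map, Function.comp_def,
                List.isPrefixOf, h1', hv]
            rw [pvA_loop, pvB_loop_step_some vs _ _ _ hfind]
            simp only [if_neg hh, reduceIte, hpredeq, hv]
            simp [ih rest hrest]
      · by_cases hc2 : c = '}'
        · subst hc2
          by_cases hh : rest.head? = some '}'
          · obtain ⟨rest2, rfl⟩ : ∃ r2, rest = '}' :: r2 := by
              cases rest with
              | nil => simp at hh
              | cons d r2 =>
                simp only [List.head?_cons, Option.some.injEq] at hh
                exact ⟨r2, by rw [hh]⟩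
            have h2 : rest2.length ≤ n := by simp at hrest; omega
            have hfind : (pvB_patterns vs).find?
                (fun p => p.1.isPrefixOf ('}' :: '}' :: rest2)) =
                some (['}', '}'], "}}}}".toList) := by
              simp [pvB_patterns, List.find?_append, List.find?_map, Function.comp_def,
                List.isPrefixOf, pv_find_false]
            rw [pvA_loop, pvB_loop_step_some vs _ _ _ hfind]
            simp only [List.head?_cons, reduceIte]
            simp [ih rest2 h2]
          · have h2' : (['}'].isPrefixOf rest) = false := by
              cases rest with
              | nil => rfl
              | cons d r2 =>
                simp only [List.head?_cons, Option.some.injEq] at hh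
                simp [List.isPrefixOf]
                exact fun h => hh h.symm
            have hfind : (pvB_patterns vs).find?
                (fun p => p.1.isPrefixOf ('}' :: rest)) =
                some (['}'], "}}".toList) := by
              simp [pvB_patterns, List.find?_append, List.find?_map, Function.comp_def,
                List.isPrefixOf, h2', pv_find_false]
            rw [pvA_loop, pvB_loop_step_some vs _ _ _ hfind]
            simp only [reduceIte, if_neg hh]
            simp [ih rest hrest]
        · have hfind := pv_find_other vs c rest hc hc2
          rw [pvA_loop, pvB_loop_step_none vs _ _ hfind]
          simp only [if_neg hc, if_neg hc2]
          simp [ih rest hrest]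

-- ===== VERDICT (by name: the statement is the Claim_ definition above) =====
theorem escape_invalid_curly_brackets_spec : Claim_equal_escape_invalid_curly_brackets := by
  intro text valids _
  unfold Spec_escape_invalid_curly_brackets escape_invalid_curly_brackets escape_invalid_curly_brackets_alt
  rw [pv_main_n (valids.map String.toList) text.toList.length text.toList le_rfl []]
  rfl
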